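-- pv_equiv track=rewrite | github.com/patryk-rybak/University | Artificial-Intelligence/p1/ex5.py | is_col_ok
-- ===== SOURCE A (Python) =====
-- def is_col_ok(col_index, cols, img): # ok
--     col = [img[i][col_index] for i in range(len(img))]
--     counter = 0
--     for i in col:
--         if i == '#': counter += 1
--     if counter != cols[col_index]: return False
--     for i in range(col.index('#'), col.index('#') + cols[col_index]):
--         if col[i] != '#': return False
--     return True
-- ===== SOURCE B (Python) =====
-- def is_col_ok(col_index, cols, img):
--     count = 0
--     first = -1
--     last = -1
--     for i, row in enumerate(img):
--         if row[col_index] == '#':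
--             count += 1
--             if first < 0:
--                 first = i
--             last = i
--     if count != cols[col_index]:
--         return False
--     return first < 0 or last - first + 1 == count
-- ===== Notes on version B (the rewrite author's own statement) =====
-- stated objective: alternative
-- what changed: B makes a single pass over the rows with an accumulator (count, first, last) instead of A's materialised column plus a second rescan of the purported block; the single-block property becomes last - first + 1 == count.
import Mathlib
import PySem

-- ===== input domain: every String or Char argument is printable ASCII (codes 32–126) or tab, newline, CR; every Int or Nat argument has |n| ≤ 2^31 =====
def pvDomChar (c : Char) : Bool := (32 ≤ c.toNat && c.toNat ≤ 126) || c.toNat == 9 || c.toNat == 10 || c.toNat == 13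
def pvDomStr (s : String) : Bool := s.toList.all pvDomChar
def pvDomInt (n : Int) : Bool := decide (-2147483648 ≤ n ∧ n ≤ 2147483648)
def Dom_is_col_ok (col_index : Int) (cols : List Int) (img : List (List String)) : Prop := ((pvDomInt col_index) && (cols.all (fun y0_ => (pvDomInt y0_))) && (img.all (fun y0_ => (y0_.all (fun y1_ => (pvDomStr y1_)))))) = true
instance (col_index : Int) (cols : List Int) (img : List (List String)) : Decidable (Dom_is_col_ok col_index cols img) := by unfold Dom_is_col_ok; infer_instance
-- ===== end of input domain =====

-- B replaces A's materialised column and block rescan by one pass over the rows accumulating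
-- (count, first, last) and checking last - first + 1 == count; same cost, different algorithm shape.

-- ===== PORT A =====
def is_col_ok (col_index : Int) (cols : List Int) (img : List (List String)) : Bool :=
  let col := (PySem.List.pyRange 0 (PySem.List.len img) 1).map
      (fun i => PySem.List.pyGetD (PySem.List.pyGetD img i []) col_index "")
  let counter : Int := col.foldl (fun c x => if x == "#" then c + 1 else c) 0
  if counter ≠ PySem.List.pyGetD cols col_index 0 then false
  else
    -- 'for i in range(col.index('#'), col.index('#') + cols[col_index]): if col[i] != '#': return False' / 'return True'
    (PySem.List.pyRange (((PySem.List.index? col "#").getD 0 : Nat) : Int)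
        ((((PySem.List.index? col "#").getD 0 : Nat) : Int) + PySem.List.pyGetD cols col_index 0) 1).all
      (fun i => PySem.List.pyGetD col i "" == "#")

-- ===== PORT B =====
def is_col_ok_alt (col_index : Int) (cols : List Int) (img : List (List String)) : Bool :=
  -- 'for i, row in enumerate(img): if row[col_index] == '#': count += 1; first, last updated'
  let st := (PySem.List.enumerate img 0).foldl
    (fun (st : Int × Int × Int) p =>
      if PySem.List.pyGetD p.2 col_index "" == "#" then
        (st.1 + 1, (if st.2.1 < 0 then p.1 else st.2.1), p.1)
      else st)
    (0, -1, -1)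
  if st.1 ≠ PySem.List.pyGetD cols col_index 0 then false
  else (decide (st.2.1 < 0) || decide (st.2.2 - st.2.1 + 1 = st.1))

-- ===== PRECONDITION & SPEC =====
-- Pre_ excludes exactly the raising inputs: col_index out of Python range for cols or for some row
-- (IndexError), and the case required-count = 0 with a '#'-free column, where A's col.index('#')
-- raises ValueError (B happens to return True there, but nothing is claimed on excluded inputs).
def Pre_is_col_ok (col_index : Int) (cols : List Int) (img : List (List String)) : Prop :=
  PySem.Raise.InRange cols.length col_index ∧
  (∀ row ∈ img, PySem.Raise.InRange row.length col_index) ∧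
  ¬ (PySem.List.pyGetD cols col_index 0 = 0 ∧
     ∀ row ∈ img, PySem.List.pyGetD row col_index "" ≠ "#")
instance (col_index : Int) (cols : List Int) (img : List (List String)) : Decidable (Pre_is_col_ok col_index cols img) := by unfold Pre_is_col_ok; infer_instance

def pvWitness_is_col_ok : Int × List Int × List (List String) := (0, [1], [["#"]])

def Spec_is_col_ok (col_index : Int) (cols : List Int) (img : List (List String)) (out : Bool) : Prop := out = is_col_ok_alt col_index cols img
instance (col_index : Int) (cols : List Int) (img : List (List String)) (out : Bool) : Decidable (Spec_is_col_ok col_index cols img out) := by unfold Spec_is_col_ok; infer_instance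

-- ===== CLAIM (what is proved, stated in full; the proofs are below) =====
def Claim_equal_is_col_ok : Prop := ∀ (col_index : Int) (cols : List Int) (img : List (List String)), Dom_is_col_ok col_index cols img → Pre_is_col_ok col_index cols img → Spec_is_col_ok col_index cols img (is_col_ok col_index cols img)

-- ===== LEMMAS AND PROOFS =====

-- B's loop body, seen on the column values (second components already projected)
def stepS (st : Int × Int × Int) (p : Int × String) : Int × Int × Int :=
  if p.2 == "#" then (st.1 + 1, (if st.2.1 < 0 then p.1 else st.2.1), p.1) else st

lemma enum_map (h : List String → String) (l : List (List String)) (k : Int) :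
    PySem.List.enumerate (l.map h) k = (PySem.List.enumerate l k).map (fun p => (p.1, h p.2)) := by
  induction l generalizing k with
  | nil => simp [PySem.List.enumerate_nil]
  | cons x xs ih => simp [PySem.List.enumerate_cons, ih]

-- the port's fold over the rows is the stepS fold over the column
lemma fold_port_eq (col_index : Int) (img : List (List String)) (st : Int × Int × Int) :
    (PySem.List.enumerate img 0).foldl
      (fun (st : Int × Int × Int) p =>
        if PySem.List.pyGetD p.2 col_index "" == "#" then
          (st.1 + 1, (if st.2.1 < 0 then p.1 else st.2.1), p.1)
        else st) st =
    (PySem.List.enumerate (img.map (fun row => PySem.List.pyGetD row col_index "")) 0).foldl stepS st := by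
  rw [enum_map, List.foldl_map]
  rfl

-- invariant once first ≥ 0: count accumulates, first is frozen, last tracks the last '#'
lemma foldS_nonneg (l : List String) (k c f la : Int) (hf : 0 ≤ f) :
    (PySem.List.enumerate l k).foldl stepS (c, f, la) =
    (c + (l.count "#" : Nat), f,
      if "#" ∈ l then k + (l.length : Int) - 1 - (((PySem.List.index? l.reverse "#").getD 0 : Nat) : Int) else la) := by
  induction l generalizing k c la with
  | nil => simp [PySem.List.enumerate_nil]
  | cons x xs ih =>
    rw [PySem.List.enumerate_cons, List.foldl_cons]
    by_cases hx : x = "#"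
    · subst hx
      have hstep : stepS (c, f, la) ((k, "#") : Int × String) = (c + 1, f, k) := by
        simp [stepS]; omega
      rw [hstep, ih (k + 1) (c + 1) k]
      by_cases hm : "#" ∈ xs
      · have hR : PySem.List.index? (("#" :: xs) : List String).reverse "#" =
            PySem.List.index? xs.reverse "#" := by
          rw [List.reverse_cons]
          exact PySem.List.index?_append_of_mem _ (List.mem_reverse.mpr hm)
        simp only [hm, if_pos, List.mem_cons, true_or, List.count_cons, List.length_cons, hR]
        refine Prod.ext ?_ (Prod.ext rfl ?_) <;> simp <;> omega
      · have hR : PySem.List.index? (("#" :: xs) : List String).reverse "#" =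
            some xs.reverse.length := by
          rw [List.reverse_cons]
          exact PySem.List.index?_append_singleton_self xs.reverse "#" (by simpa using hm)
        simp only [hm, List.mem_cons, List.count_cons, List.length_cons, hR]
        refine Prod.ext ?_ (Prod.ext rfl ?_) <;> simp [List.count_eq_zero.mpr hm] <;> omega
    · have hstep : stepS (c, f, la) ((k, x) : Int × String) = (c, f, la) := by
        simp [stepS, hx]
      rw [hstep, ih (k + 1) c la]
      have hne : "#" ≠ x := fun h => hx h.symm
      have hmem : ("#" ∈ (x :: xs : List String)) ↔ "#" ∈ xs := by
        simp [List.mem_cons, hne]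
      by_cases hm : "#" ∈ xs
      · have hR : PySem.List.index? ((x :: xs) : List String).reverse "#" =
            PySem.List.index? xs.reverse "#" := by
          rw [List.reverse_cons]
          exact PySem.List.index?_append_of_mem _ (List.mem_reverse.mpr hm)
        simp only [hm, if_pos, hmem.mpr hm, List.count_cons, List.length_cons, hR]
        refine Prod.ext ?_ (Prod.ext rfl ?_) <;> simp [hx] <;> omega
      · simp only [hm, hmem, List.count_cons]
        simp [hx]

-- from the initial state: the fold finds count, first and last '#' positions
lemma foldS_neg (l : List String) (k c f la : Int) (hf : f < 0) (hk : 0 ≤ k) :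
    (PySem.List.enumerate l k).foldl stepS (c, f, la) =
    if "#" ∈ l then
      (c + (l.count "#" : Nat),
       k + (((PySem.List.index? l "#").getD 0 : Nat) : Int),
       k + (l.length : Int) - 1 - (((PySem.List.index? l.reverse "#").getD 0 : Nat) : Int))
    else (c, f, la) := by
  induction l generalizing k c with
  | nil => simp [PySem.List.enumerate_nil]
  | cons x xs ih =>
    rw [PySem.List.enumerate_cons, List.foldl_cons]
    by_cases hx : x = "#"
    · subst hx
      have hstep : stepS (c, f, la) ((k, "#") : Int × String) = (c + 1, k, k) := by
        simp [stepS]; omega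
      rw [hstep, foldS_nonneg xs (k + 1) (c + 1) k k hk]
      have hF : PySem.List.index? (("#" :: xs) : List String) "#" = some 0 :=
        PySem.List.index?_cons_self "#" xs
      by_cases hm : "#" ∈ xs
      · have hR : PySem.List.index? (("#" :: xs) : List String).reverse "#" =
            PySem.List.index? xs.reverse "#" := by
          rw [List.reverse_cons]
          exact PySem.List.index?_append_of_mem _ (List.mem_reverse.mpr hm)
        simp only [List.mem_cons, true_or, if_pos, hm, List.count_cons, List.length_cons, hR, hF]
        refine Prod.ext ?_ (Prod.ext ?_ ?_) <;> simp <;> push_cast <;> omega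
      · have hR : PySem.List.index? (("#" :: xs) : List String).reverse "#" =
            some xs.reverse.length := by
          rw [List.reverse_cons]
          exact PySem.List.index?_append_singleton_self xs.reverse "#" (by simpa using hm)
        simp only [List.mem_cons, true_or, if_pos, hm, List.count_cons, List.length_cons, hR, hF]
        refine Prod.ext ?_ (Prod.ext ?_ ?_) <;> simp [List.count_eq_zero.mpr hm] <;> omega
    · have hstep : stepS (c, f, la) ((k, x) : Int × String) = (c, f, la) := by
        simp [stepS, hx]
      rw [hstep, ih (k + 1) c (by omega)]
      have hne : "#" ≠ x := fun h => hx h.symm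
      have hmem : ("#" ∈ (x :: xs : List String)) ↔ "#" ∈ xs := by
        simp [List.mem_cons, hne]
      by_cases hm : "#" ∈ xs
      · obtain ⟨n, hn⟩ := Option.isSome_iff_exists.mp ((PySem.List.index?_isSome_iff xs "#").mpr hm)
        have hF : PySem.List.index? ((x :: xs) : List String) "#" = some (n + 1) := by
          rw [PySem.List.index?_cons_of_ne xs hx, hn]; rfl
        have hR : PySem.List.index? ((x :: xs) : List String).reverse "#" =
            PySem.List.index? xs.reverse "#" := by
          rw [List.reverse_cons]
          exact PySem.List.index?_append_of_mem _ (List.mem_reverse.mpr hm)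
        simp only [hm, if_pos, hmem.mpr hm, List.count_cons, List.length_cons, hR, hF, hn]
        refine Prod.ext ?_ (Prod.ext ?_ ?_) <;> simp [hx] <;> push_cast <;> omega
      · simp only [hm, hmem]
        simp [hx]

-- the shared column comprehension is the column read off row by row
lemma col_eq (col_index : Int) (img : List (List String)) :
    (PySem.List.pyRange 0 (PySem.List.len img) 1).map
        (fun i => PySem.List.pyGetD (PySem.List.pyGetD img i []) col_index "") =
    img.map (fun row => PySem.List.pyGetD row col_index "") := by
  have h := PySem.List.map_pyGetD_pyRange_zero (xs := img) (d := ([] : List (String)))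
  calc (PySem.List.pyRange 0 (PySem.List.len img) 1).map
          (fun i => PySem.List.pyGetD (PySem.List.pyGetD img i []) col_index "")
      = ((PySem.List.pyRange 0 (PySem.List.len img) 1).map
          (fun i => PySem.List.pyGetD img i [])).map
          (fun row => PySem.List.pyGetD row col_index "") := by
        rw [List.map_map]; rfl
    _ = img.map (fun row => PySem.List.pyGetD row col_index "") := by rw [h]

-- core: for a column containing '#', A's block rescan equals the span test
lemma span_iff (l : List String) (hmem : "#" ∈ l) :
    ((PySem.List.pyRange (((PySem.List.index? l "#").getD 0 : Nat) : Int)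
        ((((PySem.List.index? l "#").getD 0 : Nat) : Int) + ((l.count "#" : Nat) : Int)) 1).all
      (fun i => PySem.List.pyGetD l i "" == "#")) =
    decide (PySem.List.len l - 1 - (((PySem.List.index? l.reverse "#").getD 0 : Nat) : Int) -
        (((PySem.List.index? l "#").getD 0 : Nat) : Int) + 1 = ((l.count "#" : Nat) : Int)) := by
  obtain ⟨fn, hf⟩ := Option.isSome_iff_exists.mp ((PySem.List.index?_isSome_iff l "#").mpr hmem)
  have hmemr : "#" ∈ l.reverse := List.mem_reverse.mpr hmem
  obtain ⟨Rn, hR⟩ := Option.isSome_iff_exists.mp ((PySem.List.index?_isSome_iff l.reverse "#").mpr hmemr)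
  obtain ⟨p, s, hl, hplen, hpnot⟩ := (PySem.List.index?_eq_some_iff l "#" fn).mp hf
  obtain ⟨q, t, hlr, hqlen, hqnot⟩ := (PySem.List.index?_eq_some_iff l.reverse "#" Rn).mp hR
  rw [hf, hR]
  simp only [Option.getD_some, PySem.List.len_eq]
  set c := l.count "#" with hc
  -- counting facts
  have hscount : c = 1 + s.count "#" := by
    rw [hc, hl]; simp [List.count_append, List.count_eq_zero.mpr hpnot]; omega
  have hlen : l.length = fn + 1 + s.length := by
    rw [hl]; simp [hplen]; omega
  have hfc : fn + c ≤ l.length := by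
    have := List.count_le_length (l := s) (a := "#"); omega
  -- l decomposed from the right
  have hlright : l = t.reverse ++ "#" :: q.reverse := by
    have h := congrArg List.reverse hlr
    simpa using h
  have hqrnot : "#" ∉ q.reverse := by simpa using hqnot
  have hlen2 : l.length = t.length + 1 + Rn := by
    rw [hlright]; simp [hqlen]; omega
  -- drop/take plumbing
  have hdrop_add : ∀ j : Nat, l.drop (fn + j) = ("#" :: s).drop j := by
    intro j; rw [hl, ← hplen]; simp
  have hdropfn : l.drop fn = "#" :: s := by
    have h := hdrop_add 0; simpa using h
  have hmcount : ("#" :: s).count "#" = c := by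
    simp [hscount]; omega
  have htc : ∀ j : Nat, (("#" :: s).take j).count "#" + (("#" :: s).drop j).count "#" = c := by
    intro j; rw [← List.count_append, List.take_append_drop, hmcount]
  have hget : ∀ k : Nat, ∀ h : k < 1 + s.length,
      l[fn + k]'(by omega) = ("#" :: s)[k]'(by simp; omega) := by
    intro k h
    rw [List.getElem_of_eq hl (by omega), List.getElem_append_right (by omega)]
    congr 1
    omega
  -- the last-'#' position
  have hlast : l[t.length]'(by omega) = "#" := by
    rw [List.getElem_of_eq hlright (by omega), List.getElem_append_right (by simp)]
    simp
  have hfirst := PySem.List.getElem_of_index?_eq_some hf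
  obtain ⟨hfnlt, hfnval, hfnmin⟩ := hfirst
  have hfnle : fn ≤ t.length := by
    by_contra hno
    exact hfnmin t.length (by omega) hlast
  -- the key region characterization: K := '#' not in l.drop (fn + c)
  have key1 : (∀ i : Int, (fn : Int) ≤ i → i < (fn : Int) + (c : Int) →
      PySem.List.pyGetD l i "" = "#") ↔ "#" ∉ l.drop (fn + c) := by
    have hXlen : (("#" :: s).take c).length = c := by simp; omega
    have step1 : (∀ i : Int, (fn : Int) ≤ i → i < (fn : Int) + (c : Int) →
        PySem.List.pyGetD l i "" = "#") ↔ ∀ b ∈ ("#" :: s).take c, b = "#" := by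
      constructor
      · intro hS b hb
        obtain ⟨k, hk, hbk⟩ := List.mem_take_iff_getElem.mp hb
        have hk' : k < c := by omega
        have := hS ((fn : Int) + (k : Int)) (by omega) (by omega)
        rw [PySem.List.pyGetD_eq_getElem l "" (by omega) (by omega)] at this
        have htn : ((fn : Int) + (k : Int)).toNat = fn + k := by omega
        rw [← hbk]
        rw [← hget k (by simp at hk; omega)]
        simp only [htn] at this
        exact this
      · intro hAll i hi1 hi2
        have h0 : (0:Int) ≤ i := by omega
        rw [PySem.List.pyGetD_eq_getElem l "" h0 (by omega)]
        have hk : i.toNat = fn + (i.toNat - fn) := by omega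
        set k := i.toNat - fn with hkdef
        have hkc : k < c := by omega
        have hklen : k < 1 + s.length := by omega
        have : l[i.toNat]'(by omega) = l[fn + k]'(by omega) := by congr 1
        rw [this, hget k hklen]
        refine hAll _ ?_
        rw [← List.getElem_take (h := by rw [hXlen]; exact hkc) (j := c)]
        exact List.getElem_mem _
    rw [step1]
    constructor
    · intro hAll
      have hcnt : (("#" :: s).take c).count "#" = c := by
        rw [List.count_eq_length.mpr (fun b hb => (hAll b hb).symm), hXlen]
      have hdc : (("#" :: s).drop c).count "#" = 0 := by have := htc c; omega
      rw [← hdrop_add c] at hdc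
      exact List.count_eq_zero.mp hdc
    · intro hK
      have hdc : (("#" :: s).drop c).count "#" = 0 := by
        rw [hdrop_add c] at hK; exact List.count_eq_zero.mpr hK
      have hcnt : (("#" :: s).take c).count "#" = c := by have := htc c; omega
      have hall : ∀ b ∈ ("#" :: s).take c, "#" = b := by
        rw [← List.count_eq_length]; omega
      exact fun b hb => (hall b hb).symm
  -- the arithmetic side characterization
  have key2 : ((l.length : Int) - 1 - (Rn : Int) - (fn : Int) + 1 = (c : Int)) ↔
      "#" ∉ l.drop (fn + c) := by
    constructor
    · intro hE
      have hteq : t.length + 1 = fn + c := by omega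
      have : l.drop (fn + c) = q.reverse := by
        rw [← hteq, hlright]
        have : t.reverse ++ "#" :: q.reverse = (t.reverse ++ ["#"]) ++ q.reverse := by simp
        rw [this]
        have hlen3 : (t.reverse ++ ["#"]).length = t.length + 1 := by simp
        rw [← hlen3, List.drop_left]
      rw [this]; exact hqrnot
    · intro hK
      have hdropT : l.drop (t.length + 1) = q.reverse := by
        rw [hlright]
        have : t.reverse ++ "#" :: q.reverse = (t.reverse ++ ["#"]) ++ q.reverse := by simp
        rw [this]
        have hlen3 : (t.reverse ++ ["#"]).length = t.length + 1 := by simp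
        rw [← hlen3, List.drop_left]
      have hub : fn + c ≤ t.length + 1 := by
        set j := t.length + 1 - fn with hj
        have hdj : (("#" :: s).drop j).count "#" = 0 := by
          rw [← hdrop_add j]
          have : fn + j = t.length + 1 := by omega
          rw [this, hdropT]
          exact List.count_eq_zero.mpr hqrnot
        have hcj : (("#" :: s).take j).count "#" = c := by have := htc j; omega
        have := List.count_le_length (l := ("#" :: s).take j) (a := "#")
        have hlj : (("#" :: s).take j).length ≤ j := by simp
        omega
      have hlb : t.length < fn + c := by
        by_contra hno
        apply hK
        have : l[t.length]'(by omega) ∈ l.drop (fn + c) := by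
          have hmem2 : l[(fn + c) + (t.length - (fn + c))]'(by omega) ∈ l.drop (fn + c) := by
            rw [← List.getElem_drop (h := by simp; omega)]
            exact List.getElem_mem _
          have heq2 : l[(fn + c) + (t.length - (fn + c))]'(by omega) = l[t.length]'(by omega) := by
            congr 1
            omega
          rwa [heq2] at hmem2
        rwa [hlast] at this
      omega
  -- put it together
  rw [Bool.eq_iff_iff]
  simp only [List.all_eq_true, PySem.List.mem_pyRange_one, beq_iff_eq, decide_eq_true_eq]
  constructor
  · intro hS
    exact key2.mpr (key1.mp (fun i h1 h2 => hS i ⟨h1, h2⟩))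
  · intro hE i hi
    exact key1.mpr (key2.mp hE) i hi.1 hi.2

-- ===== VERDICT (by name: the statement is the Claim_ definition above) =====
theorem is_col_ok_spec : Claim_equal_is_col_ok := by
  intro col_index cols img _hDom hPre
  obtain ⟨_h1, _h2, h3⟩ := hPre
  unfold Spec_is_col_ok is_col_ok is_col_ok_alt
  rw [fold_port_eq]
  simp only [col_eq, PySem.List.foldl_beq_add_one, zero_add]
  set col := img.map (fun row => PySem.List.pyGetD row col_index "") with hcol
  rw [foldS_neg col 0 0 (-1) (-1) (by omega) (by omega)]
  by_cases hmem : "#" ∈ col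
  · rw [if_pos hmem]
    simp only [PySem.List.count_eq]
    by_cases hc : (((List.count "#" col : Nat)) : Int) = PySem.List.pyGetD cols col_index 0
    · rw [if_neg (by omega), if_neg (by simp; omega)]
      rw [← hc, span_iff col hmem]
      have hnn : ¬ ((0 : Int) + (((PySem.List.index? col "#").getD 0 : Nat) : Int) < 0) := by omega
      rw [decide_eq_false hnn, Bool.false_or]
      rw [decide_eq_decide, PySem.List.len_eq]
      constructor <;> intro h <;> omega
    · rw [if_pos (by omega), if_pos (by simp; omega)]
  · rw [if_neg hmem]
    have hz : col.count "#" = 0 := List.count_eq_zero.mpr hmem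
    have hreq : PySem.List.pyGetD cols col_index 0 ≠ 0 := by
      intro h0
      apply h3
      refine ⟨h0, ?_⟩
      intro row hrow heq
      exact hmem (by rw [hcol]; exact List.mem_map.mpr ⟨row, hrow, heq⟩)
    have hz' : ((col.count "#" : Nat) : Int) = 0 := by simp [hz]
    rw [if_pos (by omega), if_pos (by omega)]
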